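-- pv_equiv track=rewrite | github.com/sourcebots/srcomp-cli | sr/comp/cli/import_schedule/core.py | get_id_subsets
-- ===== SOURCE A (Python) =====
-- from typing import Collection, Iterator, Mapping, Sequence, TypeVar
--
-- T = TypeVar('T')
--
-- def get_id_subsets(ids: Collection[T], limit: int) -> Iterator[Collection[T]]:
--     num_ids = len(ids)
--
--     extra = num_ids - limit
--
--     if extra == 0:
--         # Only one possibility -- use all of them
--         yield ids
--
--     elif extra == 1:
--         for idx in range(len(ids)):
--             ids_clone = list(ids)
--             ids_clone.pop(idx)
--             yield ids_clone
--
--     elif extra == 2: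
--         for idx1 in range(len(ids)):
--             for idx2 in range(idx1 + 1, len(ids)):
--                 ids_clone = list(ids)
--                 ids_clone.pop(idx2)
--                 ids_clone.pop(idx1)
--                 yield ids_clone
--
--     elif extra == 3:
--         for idx1 in range(len(ids)):
--             for idx2 in range(idx1 + 1, len(ids)):
--                 for idx3 in range(idx2 + 1, len(ids)):
--                     ids_clone = list(ids)
--                     ids_clone.pop(idx3)
--                     ids_clone.pop(idx2)
--                     ids_clone.pop(idx1)
--                     yield ids_clone
--
--     else:
--         # TODO: consider generalising the above or adding more handling
--         raise Exception(f"Too many empty slots to compensate for ({extra}).")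
-- ===== SOURCE B (Python) =====
-- import itertools
-- from typing import Collection, Iterator, TypeVar
--
-- T = TypeVar('T')
--
-- def get_id_subsets(ids: Collection[T], limit: int) -> Iterator[Collection[T]]:
--     num_ids = len(ids)
--     extra = num_ids - limit
--
--     if extra == 0:
--         # Only one possibility -- use all of them
--         yield ids
--     elif extra in (1, 2, 3):
--         for removed in itertools.combinations(range(num_ids), extra):
--             removed_set = set(removed)
--             yield [x for i, x in enumerate(ids) if i not in removed_set]
--     else:
--         raise Exception(f"Too many empty slots to compensate for ({extra}).")
-- ===== Notes on version B (the rewrite author's own statement) =====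
-- stated objective: idiomatic
-- what changed: Replaces A's three hand-written copies of nested index loops (with in-place pops) by a single loop over itertools.combinations(range(num_ids), extra) with an enumerate-filter comprehension building each subset.
import Mathlib
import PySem

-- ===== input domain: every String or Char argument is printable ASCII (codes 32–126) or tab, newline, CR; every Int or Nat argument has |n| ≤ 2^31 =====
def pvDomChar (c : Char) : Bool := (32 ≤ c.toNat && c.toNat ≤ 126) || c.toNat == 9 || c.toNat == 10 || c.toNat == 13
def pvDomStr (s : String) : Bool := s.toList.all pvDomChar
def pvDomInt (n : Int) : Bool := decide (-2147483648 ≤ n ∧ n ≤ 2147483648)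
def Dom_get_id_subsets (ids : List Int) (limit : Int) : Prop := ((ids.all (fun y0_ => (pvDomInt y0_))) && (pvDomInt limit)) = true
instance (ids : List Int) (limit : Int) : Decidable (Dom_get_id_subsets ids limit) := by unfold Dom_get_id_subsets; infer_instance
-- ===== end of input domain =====

-- B replaces A's three copies of nested index loops by one loop over size-`extra` index
-- combinations with an enumerate-filter comprehension (objective: idiomatic, same cost).

-- ===== PORT A =====
-- list.pop(idx): every call site below has 0 ≤ idx < len(list), where pop? is exact (the getD default is never reached)
def pyPopA (xs : List Int) (i : Int) : List Int := ((PySem.List.pop? xs i).getD (0, [])).2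

def get_id_subsets (ids : List Int) (limit : Int) : List (List Int) :=
  let num_ids : Int := ids.length
  let extra : Int := num_ids - limit
  if extra = 0 then
    [ids]
  else if extra = 1 then
    (PySem.List.pyRange 0 num_ids 1).map (fun idx => pyPopA ids idx)
  else if extra = 2 then
    (PySem.List.pyRange 0 num_ids 1).flatMap (fun idx1 =>
      (PySem.List.pyRange (idx1 + 1) num_ids 1).map (fun idx2 =>
        pyPopA (pyPopA ids idx2) idx1))
  else if extra = 3 then
    (PySem.List.pyRange 0 num_ids 1).flatMap (fun idx1 =>
      (PySem.List.pyRange (idx1 + 1) num_ids 1).flatMap (fun idx2 =>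
        (PySem.List.pyRange (idx2 + 1) num_ids 1).map (fun idx3 =>
          pyPopA (pyPopA (pyPopA ids idx3) idx2) idx1)))
  else
    []  -- raise Exception(...): these inputs are excluded by Pre_get_id_subsets

-- ===== PORT B =====
-- itertools.combinations(l, k) for a duplicate-free ascending l, in Python's lexicographic order
def combosB : Nat → List Nat → List (List Nat)
  | 0, _ => [[]]
  | _ + 1, [] => []
  | k + 1, x :: xs => ((combosB k xs).map (fun c => x :: c)) ++ combosB (k + 1) xs

-- the comprehension [x for i, x in enumerate(ids) if i not in removed_set]
def keepNotIn (rm : List Nat) : List Int → Nat → List Int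
  | [], _ => []
  | x :: xs, i => if i ∈ rm then keepNotIn rm xs (i + 1) else x :: keepNotIn rm xs (i + 1)

def get_id_subsets_alt (ids : List Int) (limit : Int) : List (List Int) :=
  let num_ids : Int := ids.length
  let extra : Int := num_ids - limit
  if extra = 0 then
    [ids]
  else if extra = 1 ∨ extra = 2 ∨ extra = 3 then
    (combosB extra.toNat (List.range ids.length)).map (fun removed => keepNotIn removed ids 0)
  else
    []  -- raise Exception(...): these inputs are excluded by Pre_get_id_subsets

-- ===== PRECONDITION & SPEC =====
-- A raises (explicit raise Exception) exactly when extra = len(ids) - limit is outside {0,1,2,3}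
def Pre_get_id_subsets (ids : List Int) (limit : Int) : Prop :=
  (ids.length : Int) - limit = 0 ∨ (ids.length : Int) - limit = 1 ∨
  (ids.length : Int) - limit = 2 ∨ (ids.length : Int) - limit = 3
instance (ids : List Int) (limit : Int) : Decidable (Pre_get_id_subsets ids limit) := by
  unfold Pre_get_id_subsets; infer_instance

def pvWitness_get_id_subsets : List Int × Int := ([10, 20, 30, 40], 2)

def Spec_get_id_subsets (ids : List Int) (limit : Int) (out : List (List Int)) : Prop := out = get_id_subsets_alt ids limit
instance (ids : List Int) (limit : Int) (out : List (List Int)) : Decidable (Spec_get_id_subsets ids limit out) := by unfold Spec_get_id_subsets; infer_instance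

-- ===== CLAIM (what is proved, stated in full; the proofs are below) =====
def Claim_equal_get_id_subsets : Prop := ∀ (ids : List Int) (limit : Int), Dom_get_id_subsets ids limit → Pre_get_id_subsets ids limit → Spec_get_id_subsets ids limit (get_id_subsets ids limit)

-- ===== LEMMAS AND PROOFS =====

-- pop at an in-range natural index is eraseIdx
theorem pyPopA_natCast (xs : List Int) (k : Nat) (h : k < xs.length) :
    pyPopA xs (k : Int) = xs.eraseIdx k := by
  unfold pyPopA
  rw [PySem.List.pop?_natCast xs k h]
  rfl

-- keepNotIn ignores indices below the running counter
theorem keepNotIn_all_lt (rm : List Nat) :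
    ∀ (xs : List Int) (k : Nat), (∀ i ∈ rm, i < k) → keepNotIn rm xs k = xs := by
  intro xs
  induction xs with
  | nil => intro k _; rfl
  | cons x xs ih =>
    intro k h
    have hk : k ∉ rm := fun hmem => absurd (h k hmem) (lt_irrefl k)
    simp [keepNotIn, hk, ih (k + 1) (fun i hi => Nat.lt_succ_of_lt (h i hi))]

theorem keepNotIn_congr (rm rm' : List Nat) (hiff : ∀ m, m ∈ rm ↔ m ∈ rm') :
    ∀ (xs : List Int) (k : Nat), keepNotIn rm xs k = keepNotIn rm' xs k := by
  intro xs
  induction xs with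
  | nil => intro k; rfl
  | cons x xs ih =>
    intro k
    by_cases hk : k ∈ rm
    · simp [keepNotIn, hk, (hiff k).mp hk, ih]
    · have hk' : k ∉ rm' := fun h => hk ((hiff k).mpr h)
      simp [keepNotIn, hk, hk', ih]

-- removing the largest index first commutes with the filter
theorem keepNotIn_cons_max (j : Nat) (rm : List Nat) (hrm : ∀ i ∈ rm, i < j) :
    ∀ (xs : List Int) (k : Nat), k ≤ j →
      keepNotIn (j :: rm) xs k = keepNotIn rm (xs.eraseIdx (j - k)) k := by
  intro xs
  induction xs with
  | nil => intro k _; rfl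
  | cons x xs ih =>
    intro k hk
    rcases Nat.eq_or_lt_of_le hk with heq | hlt
    · subst heq
      have h1 : k ∈ (k :: rm) := List.mem_cons_self
      have h2 : k - k = 0 := Nat.sub_self k
      simp only [keepNotIn, if_pos h1, h2, List.eraseIdx_cons_zero]
      rw [keepNotIn_all_lt (k :: rm) xs (k + 1)
          (by intro i hi; rcases List.mem_cons.mp hi with h | h
              · omega
              · exact Nat.lt_succ_of_lt (hrm i h)),
          keepNotIn_all_lt rm xs k hrm]
    · have hne : k ≠ j := Nat.ne_of_lt hlt
      have hsub : j - k = (j - (k + 1)) + 1 := by omega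
      rw [hsub]
      by_cases hmem : k ∈ rm
      · have : k ∈ j :: rm := List.mem_cons_of_mem _ hmem
        simp only [keepNotIn, if_pos this, if_pos hmem, List.eraseIdx_cons_succ]
        exact ih (k + 1) hlt
      · have : k ∉ j :: rm := by
          intro h; rcases List.mem_cons.mp h with h | h
          · exact hne h
          · exact hmem h
        simp only [keepNotIn, if_neg this, if_neg hmem, List.eraseIdx_cons_succ]
        rw [ih (k + 1) hlt]

theorem keepNotIn_nil (xs : List Int) (k : Nat) : keepNotIn [] xs k = xs :=
  keepNotIn_all_lt [] xs k (by intro i hi; cases hi)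

theorem keepNotIn_one (i : Nat) (xs : List Int) :
    keepNotIn [i] xs 0 = xs.eraseIdx i := by
  rw [keepNotIn_cons_max i [] (by intro m hm; cases hm) xs 0 (Nat.zero_le i)]
  simp [keepNotIn_nil]

theorem keepNotIn_two (i j : Nat) (hij : i < j) (xs : List Int) :
    keepNotIn [i, j] xs 0 = (xs.eraseIdx j).eraseIdx i := by
  rw [keepNotIn_congr [i, j] [j, i] (by intro m; simp; tauto) xs 0,
      keepNotIn_cons_max j [i] (by intro m hm; simp at hm; omega) xs 0 (Nat.zero_le j)]
  simp [keepNotIn_one]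

theorem keepNotIn_three (i j l : Nat) (hij : i < j) (hjl : j < l) (xs : List Int) :
    keepNotIn [i, j, l] xs 0 = ((xs.eraseIdx l).eraseIdx j).eraseIdx i := by
  rw [keepNotIn_congr [i, j, l] [l, i, j] (by intro m; simp; tauto) xs 0,
      keepNotIn_cons_max l [i, j] (by intro m hm; simp at hm; omega) xs 0 (Nat.zero_le l)]
  simp [keepNotIn_two i j hij]

-- combinations of size 1
theorem combosB_one (l : List Nat) : combosB 1 l = l.map (fun x => [x]) := by
  induction l with
  | nil => rfl
  | cons x xs ih => simp [combosB, ih]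

-- pyRange over natural bounds, with any function applied
theorem map_pyRange_nat {β : Type} (a n : Nat) (f : Int → β) :
    (PySem.List.pyRange (a : Int) (n : Int) 1).map f
      = (List.range' a (n - a)).map (fun k : Nat => f (k : Int)) := by
  rw [PySem.List.pyRange_one, List.range'_eq_map_range]
  have h : ((n : Int) - (a : Int)).toNat = n - a := by omega
  rw [h, List.map_map, List.map_map]
  apply List.map_congr_left
  intro k _
  simp only [Function.comp_apply]
  congr 1

theorem flatMap_congr_mem {α β : Type} (l : List α) (f g : α → List β)
    (h : ∀ x ∈ l, f x = g x) : l.flatMap f = l.flatMap g := by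
  induction l with
  | nil => rfl
  | cons x xs ih =>
    simp only [List.flatMap_cons]
    rw [h x List.mem_cons_self, ih (fun y hy => h y (List.mem_cons_of_mem x hy))]

theorem flatMap_pyRange_nat {β : Type} (a n : Nat) (f : Int → List β) :
    (PySem.List.pyRange (a : Int) (n : Int) 1).flatMap f
      = (List.range' a (n - a)).flatMap (fun k : Nat => f (k : Int)) := by
  rw [List.flatMap_def, List.flatMap_def, map_pyRange_nat a n f]

-- combinations of size 2 over an ascending range, unrolled to nested loops
theorem combosB_two {β : Type} (n : Nat) (g : List Nat → β) :
    ∀ (m a : Nat), a + m = n →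
      (combosB 2 (List.range' a m)).map g
        = (List.range' a m).flatMap (fun i =>
            (List.range' (i + 1) (n - (i + 1))).map (fun j => g [i, j])) := by
  intro m
  induction m with
  | zero => intro a _; rfl
  | succ m ih =>
    intro a hn
    rw [List.range'_succ]
    simp only [combosB, List.map_append, List.map_map, List.flatMap_cons]
    rw [combosB_one, List.map_map, ih (a + 1) (by omega)]
    have h : n - (a + 1) = m := by omega
    rw [h]
    rfl

-- combinations of size 3 over an ascending range, unrolled to nested loops
theorem combosB_three {β : Type} (n : Nat) (g : List Nat → β) :
    ∀ (m a : Nat), a + m = n →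
      (combosB 3 (List.range' a m)).map g
        = (List.range' a m).flatMap (fun i =>
            (List.range' (i + 1) (n - (i + 1))).flatMap (fun j =>
              (List.range' (j + 1) (n - (j + 1))).map (fun k => g [i, j, k]))) := by
  intro m
  induction m with
  | zero => intro a _; rfl
  | succ m ih =>
    intro a hn
    rw [List.range'_succ]
    simp only [combosB, List.map_append, List.map_map, List.flatMap_cons, Function.comp_def]
    rw [combosB_two n (fun c => g (a :: c)) m (a + 1) (by omega), ih (a + 1) (by omega)]
    have h : n - (a + 1) = m := by omega
    rw [h]

theorem zero_int_cast : ((0 : Int)) = ((0 : Nat) : Int) := rfl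

-- the extra = 1 case
theorem case_one (ids : List Int) :
    (PySem.List.pyRange 0 (ids.length : Int) 1).map (fun idx => pyPopA ids idx)
      = (combosB 1 (List.range ids.length)).map (fun rm => keepNotIn rm ids 0) := by
  rw [zero_int_cast, map_pyRange_nat 0 ids.length, combosB_one, List.map_map,
      List.range_eq_range']
  simp only [Nat.sub_zero]
  apply List.map_congr_left
  intro k hk
  have hk' : k < ids.length := by
    have := (List.mem_range'_1).mp hk; omega
  simp only [Function.comp_apply]
  rw [pyPopA_natCast ids k hk', keepNotIn_one]

-- the extra = 2 case
theorem case_two (ids : List Int) :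
    (PySem.List.pyRange 0 (ids.length : Int) 1).flatMap (fun idx1 =>
      (PySem.List.pyRange (idx1 + 1) (ids.length : Int) 1).map (fun idx2 =>
        pyPopA (pyPopA ids idx2) idx1))
      = (combosB 2 (List.range ids.length)).map (fun rm => keepNotIn rm ids 0) := by
  rw [zero_int_cast, flatMap_pyRange_nat 0 ids.length, List.range_eq_range',
      combosB_two ids.length (fun rm => keepNotIn rm ids 0) ids.length 0 (by omega)]
  simp only [Nat.sub_zero]
  apply flatMap_congr_mem
  intro i hi
  have hi' : i < ids.length := by have := (List.mem_range'_1).mp hi; omega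
  have hcast : ((i : Int) + 1) = ((i + 1 : Nat) : Int) := by push_cast; ring
  rw [hcast, map_pyRange_nat (i + 1) ids.length]
  apply List.map_congr_left
  intro j hj
  have hj' : i + 1 ≤ j ∧ j < ids.length := by
    have := (List.mem_range'_1).mp hj; omega
  rw [pyPopA_natCast ids j hj'.2,
      pyPopA_natCast (ids.eraseIdx j) i
        (by rw [List.length_eraseIdx_of_lt hj'.2]; omega),
      keepNotIn_two i j (by omega)]

-- the extra = 3 case
theorem case_three (ids : List Int) :
    (PySem.List.pyRange 0 (ids.length : Int) 1).flatMap (fun idx1 =>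
      (PySem.List.pyRange (idx1 + 1) (ids.length : Int) 1).flatMap (fun idx2 =>
        (PySem.List.pyRange (idx2 + 1) (ids.length : Int) 1).map (fun idx3 =>
          pyPopA (pyPopA (pyPopA ids idx3) idx2) idx1)))
      = (combosB 3 (List.range ids.length)).map (fun rm => keepNotIn rm ids 0) := by
  rw [zero_int_cast, flatMap_pyRange_nat 0 ids.length, List.range_eq_range',
      combosB_three ids.length (fun rm => keepNotIn rm ids 0) ids.length 0 (by omega)]
  simp only [Nat.sub_zero]
  apply flatMap_congr_mem
  intro i hi
  have hi' : i < ids.length := by have := (List.mem_range'_1).mp hi; omega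
  have hcast : ((i : Int) + 1) = ((i + 1 : Nat) : Int) := by push_cast; ring
  rw [hcast, flatMap_pyRange_nat (i + 1) ids.length]
  apply flatMap_congr_mem
  intro j hj
  have hj' : i + 1 ≤ j ∧ j < ids.length := by
    have := (List.mem_range'_1).mp hj; omega
  have hcast2 : ((j : Int) + 1) = ((j + 1 : Nat) : Int) := by push_cast; ring
  rw [hcast2, map_pyRange_nat (j + 1) ids.length]
  apply List.map_congr_left
  intro l hl
  have hl' : j + 1 ≤ l ∧ l < ids.length := by
    have := (List.mem_range'_1).mp hl; omega
  rw [pyPopA_natCast ids l hl'.2,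
      pyPopA_natCast (ids.eraseIdx l) j
        (by rw [List.length_eraseIdx_of_lt hl'.2]; omega),
      pyPopA_natCast ((ids.eraseIdx l).eraseIdx j) i
        (by rw [List.length_eraseIdx_of_lt (by rw [List.length_eraseIdx_of_lt hl'.2]; omega : j < (ids.eraseIdx l).length)]
            rw [List.length_eraseIdx_of_lt hl'.2]; omega),
      keepNotIn_three i j l (by omega) (by omega)]

-- ===== VERDICT (by name: the statement is the Claim_ definition above) =====
theorem get_id_subsets_spec : Claim_equal_get_id_subsets := by
  intro ids limit _ hpre
  unfold Spec_get_id_subsets get_id_subsets get_id_subsets_alt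
  rcases hpre with h | h | h | h
  · simp only [h]
    norm_num
  · simp only [h]
    norm_num
    exact case_one ids
  · simp only [h]
    norm_num
    exact case_two ids
  · simp only [h]
    norm_num
    exact case_three ids
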